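-- pv_equiv track=rewrite | github.com/ivelinakaraivanova/SoftUniPythonAdvanced | src/Multidimensional_Lists_Exercise/06_Knight_Game.py | get_attacked_count
-- ===== SOURCE A (Python) =====
-- def is_valid(position, size):
--     row, col = position
--     return 0 <= row < size and 0 <= col < size
--
-- def get_attacked_count(matrix, r, c, size):
--     attacked_knights = 0
--     rows = [-1, 1, -2, 2, -1, 1, -2, 2]
--     cols = [2, 2, 1, 1, -2, -2, -1, -1]
--     for i in range(8):
--         current_position = [r + rows[i], c + cols[i]]
--         if is_valid(current_position, size) and matrix[current_position[0]][current_position[1]] == "K":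
--             attacked_knights += 1
--     return attacked_knights
-- ===== SOURCE B (Python) =====
-- def get_attacked_count(matrix, r, c, size):
--     count = 0
--     for i, row in enumerate(matrix):
--         for j, cell in enumerate(row):
--             if cell == "K" and 0 <= i < size and 0 <= j < size \
--                     and (abs(i - r), abs(j - c)) in ((1, 2), (2, 1)):
--                 count += 1
--     return count
-- ===== Notes on version B (the rewrite author's own statement) =====
-- stated objective: alternative
-- what changed: Instead of generating the 8 candidate squares and indexing the matrix, B scans every cell of the matrix and counts the 'K' cells inside the size bound whose displacement from (r,c) is a knight move (|di|,|dj|) in {(1,2),(2,1)}.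
import Mathlib
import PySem

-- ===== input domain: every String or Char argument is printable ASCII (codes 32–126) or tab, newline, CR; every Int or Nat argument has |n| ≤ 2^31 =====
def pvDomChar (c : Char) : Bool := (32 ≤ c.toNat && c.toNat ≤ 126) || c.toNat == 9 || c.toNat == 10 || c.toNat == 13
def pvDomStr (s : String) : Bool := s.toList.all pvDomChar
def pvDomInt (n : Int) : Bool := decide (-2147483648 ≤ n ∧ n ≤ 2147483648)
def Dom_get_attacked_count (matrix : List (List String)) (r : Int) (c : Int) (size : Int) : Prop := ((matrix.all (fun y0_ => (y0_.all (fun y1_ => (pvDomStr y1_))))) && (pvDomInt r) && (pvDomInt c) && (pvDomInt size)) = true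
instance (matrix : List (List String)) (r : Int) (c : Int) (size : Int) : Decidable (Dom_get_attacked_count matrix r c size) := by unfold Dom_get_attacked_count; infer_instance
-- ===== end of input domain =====

-- B replaces A's generate-8-candidate-squares-and-index strategy by a scan of the whole matrix
-- testing the knight-displacement relation per cell; alternative decomposition, not faster.

-- ===== PORT A =====
def is_valid (position : Int × Int) (size : Int) : Bool :=
  decide (0 ≤ position.1 ∧ position.1 < size) && decide (0 ≤ position.2 ∧ position.2 < size)

def get_attacked_count (matrix : List (List String)) (r : Int) (c : Int) (size : Int) : Int :=
  let rows : List Int := [-1, 1, -2, 2, -1, 1, -2, 2]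
  let cols : List Int := [2, 2, 1, 1, -2, -2, -1, -1]
  (PySem.List.pyRange 0 8 1).foldl (fun attacked_knights i =>
    let cp : Int × Int := (r + PySem.List.pyGetD rows i 0, c + PySem.List.pyGetD cols i 0)
    if is_valid cp size &&
        (PySem.List.pyGetD (PySem.List.pyGetD matrix cp.1 []) cp.2 "" == "K") then
      attacked_knights + 1
    else attacked_knights) 0

-- ===== PORT B =====
def get_attacked_count_alt (matrix : List (List String)) (r : Int) (c : Int) (size : Int) : Int :=
  (PySem.List.enumerate matrix 0).foldl (fun count p =>
    (PySem.List.enumerate p.2 0).foldl (fun count q =>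
      if q.2 == "K" && decide (0 ≤ p.1 ∧ p.1 < size) && decide (0 ≤ q.1 ∧ q.1 < size) &&
          ((|p.1 - r|, |q.1 - c|) == ((1 : Int), (2 : Int)) ||
           (|p.1 - r|, |q.1 - c|) == ((2 : Int), (1 : Int))) then
        count + 1
      else count) count) 0

-- ===== PRECONDITION & SPEC =====
-- the 8 knight displacements A tries, in A's order (rows[i], cols[i])
def knightOffsets : List (Int × Int) :=
  [(-1, 2), (1, 2), (-2, 1), (2, 1), (-1, -2), (1, -2), (-2, -1), (2, -1)]

-- Pre_ excludes exactly the inputs where A raises IndexError: some candidate square lies inside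
-- the stated size×size board but outside the actual matrix (matrix smaller than `size` there).
def Pre_get_attacked_count (matrix : List (List String)) (r : Int) (c : Int) (size : Int) : Prop :=
  ∀ d ∈ knightOffsets,
    (0 ≤ r + d.1 ∧ r + d.1 < size ∧ 0 ≤ c + d.2 ∧ c + d.2 < size) →
    (r + d.1 < matrix.length ∧ c + d.2 < (matrix.getD (r + d.1).toNat []).length)
instance (matrix : List (List String)) (r : Int) (c : Int) (size : Int) : Decidable (Pre_get_attacked_count matrix r c size) := by unfold Pre_get_attacked_count; infer_instance

def pvWitness_get_attacked_count : List (List String) × Int × Int × Int :=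
  ([["K", ".", "K"], [".", ".", "K"], ["K", "K", "."]], 0, 0, 3)

def Spec_get_attacked_count (matrix : List (List String)) (r : Int) (c : Int) (size : Int) (out : Int) : Prop := out = get_attacked_count_alt matrix r c size
instance (matrix : List (List String)) (r : Int) (c : Int) (size : Int) (out : Int) : Decidable (Spec_get_attacked_count matrix r c size out) := by unfold Spec_get_attacked_count; infer_instance

-- ===== CLAIM (what is proved, stated in full; the proofs are below) =====
def Claim_equal_get_attacked_count : Prop := ∀ (matrix : List (List String)) (r : Int) (c : Int) (size : Int), Dom_get_attacked_count matrix r c size → Pre_get_attacked_count matrix r c size → Spec_get_attacked_count matrix r c size (get_attacked_count matrix r c size)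

-- ===== LEMMAS AND PROOFS =====

-- the per-candidate test A performs at displacement d
def keyOkP (matrix : List (List String)) (r c size : Int) (d : Int × Int) : Bool :=
  is_valid (r + d.1, c + d.2) size &&
    (PySem.List.pyGetD (PySem.List.pyGetD matrix (r + d.1) []) (c + d.2) "" == "K")

-- the displacement-independent part of B's cell test
def baseP (size : Int) (i j : Int) (s : String) : Bool :=
  (s == "K") && decide (0 ≤ i ∧ i < size) && decide (0 ≤ j ∧ j < size)

set_option maxHeartbeats 1000000 in
lemma A_eq_foldl (matrix : List (List String)) (r c size : Int) :
    get_attacked_count matrix r c size =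
      knightOffsets.foldl (fun acc d => if keyOkP matrix r c size d then acc + 1 else acc) 0 := rfl

lemma A_eq_countP (matrix : List (List String)) (r c size : Int) :
    get_attacked_count matrix r c size =
      (knightOffsets.countP (keyOkP matrix r c size) : Int) := by
  rw [A_eq_foldl, PySem.List.foldl_if_add_one]; simp

lemma countP_or_disjoint {α : Type} (l : List α) (p q : α → Bool)
    (h : ∀ x ∈ l, ¬(p x = true ∧ q x = true)) :
    l.countP (fun x => p x || q x) = l.countP p + l.countP q := by
  induction l with
  | nil => simp
  | cons a t ih =>
    simp only [List.countP_cons]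
    rw [ih (fun x hx => h x (List.mem_cons_of_mem a hx))]
    rcases h a (List.mem_cons_self) with hna
    by_cases hp : p a = true <;> by_cases hq : q a = true <;>
      simp [hp, hq] at * <;> omega

lemma sum_map_add_nat {α : Type} (l : List α) (f g : α → Nat) :
    (l.map (fun x => f x + g x)).sum = (l.map f).sum + (l.map g).sum := by
  induction l with
  | nil => simp
  | cons a t ih => simp [ih]; omega

lemma rowCount (f : String → Bool) (row : List String) (t s : Int) :
    (PySem.List.enumerate row s).countP (fun q => f q.2 && (q.1 == t)) =
      (if 0 ≤ t - s ∧ t - s < row.length then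
        (if f (row.getD (t - s).toNat "") then 1 else 0) else 0) := by
  induction row generalizing s with
  | nil => simp [PySem.List.enumerate_nil]
  | cons x xs ih =>
    rw [PySem.List.enumerate_cons, List.countP_cons, ih (s + 1)]
    by_cases hs : s = t
    · subst hs
      have h0 : (s - s).toNat = 0 := by omega
      have hc1 : ¬(0 ≤ s - (s + 1) ∧ s - (s + 1) < (xs.length : Int)) := by omega
      have hc2 : 0 ≤ s - s ∧ s - s < ((x :: xs).length : Int) := by
        simp only [List.length_cons]; push_cast; omega
      simp [hc1, hc2, h0]
    · have hbe : ((s : Int) == t) = false := by simp; omega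
      simp only [hbe, Bool.and_false, Bool.false_eq_true, if_false, Nat.add_zero]
      by_cases hA : 0 ≤ t - s ∧ t - s < ((x :: xs).length : Int)
      · have hA' : 0 ≤ t - (s + 1) ∧ t - (s + 1) < (xs.length : Int) := by
          simp only [List.length_cons] at hA; push_cast at hA ⊢; omega
        have hn : (t - s).toNat = (t - (s + 1)).toNat + 1 := by omega
        rw [if_pos hA', if_pos hA, hn, List.getD_cons_succ]
      · have hA' : ¬ (0 ≤ t - (s + 1) ∧ t - (s + 1) < (xs.length : Int)) := by
          simp only [List.length_cons] at hA; push_cast at hA ⊢; omega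
        rw [if_neg hA', if_neg hA]

lemma matCount (g : List String → Nat) (m : List (List String)) (t s : Int) :
    ((PySem.List.enumerate m s).map (fun p => if p.1 == t then g p.2 else 0)).sum =
      (if 0 ≤ t - s ∧ t - s < m.length then g (m.getD (t - s).toNat []) else 0) := by
  induction m generalizing s with
  | nil => simp [PySem.List.enumerate_nil]
  | cons x xs ih =>
    rw [PySem.List.enumerate_cons, List.map_cons, List.sum_cons, ih (s + 1)]
    by_cases hs : s = t
    · subst hs
      have h0 : (s - s).toNat = 0 := by omega
      have hc1 : ¬(0 ≤ s - (s + 1) ∧ s - (s + 1) < (xs.length : Int)) := by omega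
      have hc2 : 0 ≤ s - s ∧ s - s < ((x :: xs).length : Int) := by
        simp only [List.length_cons]; push_cast; omega
      simp [hc1, hc2, h0]
    · have hbe : ((s : Int) == t) = false := by simp; omega
      simp only [hbe, Bool.false_eq_true, if_false, Nat.zero_add]
      by_cases hA : 0 ≤ t - s ∧ t - s < ((x :: xs).length : Int)
      · have hA' : 0 ≤ t - (s + 1) ∧ t - (s + 1) < (xs.length : Int) := by
          simp only [List.length_cons] at hA; push_cast at hA ⊢; omega
        have hn : (t - s).toNat = (t - (s + 1)).toNat + 1 := by omega
        rw [if_pos hA', if_pos hA, hn, List.getD_cons_succ]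
      · have hA' : ¬ (0 ≤ t - (s + 1) ∧ t - (s + 1) < (xs.length : Int)) := by
          simp only [List.length_cons] at hA; push_cast at hA ⊢; omega
        rw [if_neg hA', if_neg hA]

lemma cellCount (f : String → Bool) (m : List (List String)) (ti tj : Int) :
    ((PySem.List.enumerate m 0).map (fun p =>
        (PySem.List.enumerate p.2 0).countP (fun q => f q.2 && (p.1 == ti && q.1 == tj)))).sum =
      (if 0 ≤ ti ∧ ti < m.length ∧ 0 ≤ tj ∧ tj < (m.getD ti.toNat []).length then
        (if f ((m.getD ti.toNat []).getD tj.toNat "") then 1 else 0) else 0) := by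
  have hbody : (fun p : Int × List String =>
      (PySem.List.enumerate p.2 0).countP (fun q => f q.2 && (p.1 == ti && q.1 == tj))) =
      (fun p : Int × List String => if p.1 == ti then
        (PySem.List.enumerate p.2 0).countP (fun q => f q.2 && (q.1 == tj)) else 0) := by
    funext p
    by_cases h : (p.1 == ti) = true
    · simp only [h, if_true]
      apply List.countP_congr
      intro a _
      simp [h]
    · simp only [Bool.not_eq_true] at h
      simp [h]
  rw [hbody, matCount (fun row => (PySem.List.enumerate row 0).countP (fun q => f q.2 && (q.1 == tj))) m ti 0]
  simp only [sub_zero]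
  by_cases h1 : 0 ≤ ti ∧ ti < (m.length : Int)
  · rw [if_pos h1, rowCount, sub_zero]
    split_ifs with h2 h3 h4 h5 <;> first | rfl | (exfalso; tauto)
  · rw [if_neg h1, if_neg (by tauto)]

lemma singleOffset (m : List (List String)) (r c size : Int) (d : Int × Int)
    (hd : (0 ≤ r + d.1 ∧ r + d.1 < size ∧ 0 ≤ c + d.2 ∧ c + d.2 < size) →
      (r + d.1 < m.length ∧ c + d.2 < (m.getD (r + d.1).toNat []).length)) :
    ((PySem.List.enumerate m 0).map (fun p =>
        (PySem.List.enumerate p.2 0).countP (fun q =>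
          baseP size p.1 q.1 q.2 && decide ((p.1 - r, q.1 - c) = d)))).sum =
      (if keyOkP m r c size d then 1 else 0) := by
  have hbody : (fun p : Int × List String =>
      (PySem.List.enumerate p.2 0).countP (fun q =>
        baseP size p.1 q.1 q.2 && decide ((p.1 - r, q.1 - c) = d))) =
      (fun p : Int × List String =>
      (PySem.List.enumerate p.2 0).countP (fun q =>
        ((q.2 == "K") && is_valid (r + d.1, c + d.2) size) &&
          (p.1 == (r + d.1) && q.1 == (c + d.2)))) := by
    funext p
    apply List.countP_congr
    intro q _
    by_cases hi : p.1 = r + d.1 <;> by_cases hj : q.1 = c + d.2 <;>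
      simp [baseP, is_valid, Prod.ext_iff, hi, hj, Bool.and_assoc] <;> intros <;> omega
  rw [hbody, cellCount (fun s => (s == "K") && is_valid (r + d.1, c + d.2) size) m (r + d.1) (c + d.2)]
  by_cases hv : (0 ≤ r + d.1 ∧ r + d.1 < size) ∧ (0 ≤ c + d.2 ∧ c + d.2 < size)
  · obtain ⟨hb1, hb2⟩ := hd ⟨hv.1.1, hv.1.2, hv.2.1, hv.2.2⟩
    have hvb : is_valid (r + d.1, c + d.2) size = true := by
      simp [is_valid]; exact ⟨hv.1, hv.2⟩
    have hcond : 0 ≤ r + d.1 ∧ r + d.1 < (m.length : Int) ∧ 0 ≤ c + d.2 ∧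
        c + d.2 < ((m.getD (r + d.1).toNat []).length : Int) :=
      ⟨hv.1.1, hb1, hv.2.1, hb2⟩
    rw [if_pos hcond]
    have hg1 : PySem.List.pyGetD m (r + d.1) [] = m.getD (r + d.1).toNat [] := by
      rw [PySem.List.pyGetD_eq_getElem m [] hv.1.1 hb1]
      exact (List.getD_eq_getElem _ _ (by omega)).symm
    have hg2 : PySem.List.pyGetD (m.getD (r + d.1).toNat []) (c + d.2) "" =
        (m.getD (r + d.1).toNat []).getD (c + d.2).toNat "" := by
      rw [PySem.List.pyGetD_eq_getElem (m.getD (r + d.1).toNat []) "" hv.2.1 hb2]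
      exact (List.getD_eq_getElem _ _ (by omega)).symm
    simp only [keyOkP, hg1, hg2, hvb, Bool.true_and, Bool.and_true]
  · have hvb : is_valid (r + d.1, c + d.2) size = false := by
      simp [is_valid]; intros; omega
    simp [keyOkP, hvb]

lemma mainCount (m : List (List String)) (r c size : Int) (ds : List (Int × Int))
    (hnd : ds.Nodup)
    (hpre : ∀ d ∈ ds, (0 ≤ r + d.1 ∧ r + d.1 < size ∧ 0 ≤ c + d.2 ∧ c + d.2 < size) →
      (r + d.1 < m.length ∧ c + d.2 < (m.getD (r + d.1).toNat []).length)) :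
    ((PySem.List.enumerate m 0).map (fun p =>
        (PySem.List.enumerate p.2 0).countP (fun q =>
          baseP size p.1 q.1 q.2 && decide ((p.1 - r, q.1 - c) ∈ ds)))).sum =
      ds.countP (keyOkP m r c size) := by
  induction ds with
  | nil => simp
  | cons d ds ih =>
    rw [List.nodup_cons] at hnd
    have hsplit : (fun p : Int × List String =>
        (PySem.List.enumerate p.2 0).countP (fun q =>
          baseP size p.1 q.1 q.2 && decide ((p.1 - r, q.1 - c) ∈ d :: ds))) =
        (fun p : Int × List String =>
          (PySem.List.enumerate p.2 0).countP (fun q =>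
            baseP size p.1 q.1 q.2 && decide ((p.1 - r, q.1 - c) = d)) +
          (PySem.List.enumerate p.2 0).countP (fun q =>
            baseP size p.1 q.1 q.2 && decide ((p.1 - r, q.1 - c) ∈ ds))) := by
      funext p
      rw [← countP_or_disjoint]
      · apply List.countP_congr
        intro q _
        by_cases h1 : (p.1 - r, q.1 - c) = d <;> by_cases h2 : (p.1 - r, q.1 - c) ∈ ds <;>
          simp [h1, h2] <;> tauto
      · intro x _ hx
        simp at hx
        exact hnd.1 (hx.1.2 ▸ hx.2.2)
    rw [hsplit, sum_map_add_nat, singleOffset m r c size d (hpre d List.mem_cons_self),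
      ih hnd.2 (fun d' hd' => hpre d' (List.mem_cons_of_mem d hd')), List.countP_cons]
    omega

lemma rel_mem (a b : Int) :
    ((|a|, |b|) == ((1 : Int), (2 : Int)) || (|a|, |b|) == ((2 : Int), (1 : Int))) =
      decide ((a, b) ∈ knightOffsets) := by
  rw [Bool.eq_iff_iff]
  simp only [Bool.or_eq_true, beq_iff_eq, Prod.mk.injEq, decide_eq_true_eq, knightOffsets,
    List.mem_cons, List.not_mem_nil, or_false]
  rcases abs_cases a with ⟨h1, _⟩ | ⟨h1, _⟩ <;> rcases abs_cases b with ⟨h2, _⟩ | ⟨h2, _⟩ <;>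
    rw [h1, h2] <;> constructor <;> intro h <;> rcases h with h | h <;>
    simp_all <;> omega

lemma B_eq_sum (matrix : List (List String)) (r c size : Int) :
    get_attacked_count_alt matrix r c size =
      (((PySem.List.enumerate matrix 0).map (fun p =>
        (PySem.List.enumerate p.2 0).countP (fun q =>
          baseP size p.1 q.1 q.2 && decide ((p.1 - r, q.1 - c) ∈ knightOffsets)))).sum : Int) := by
  unfold get_attacked_count_alt
  have hinner : (fun (count : Int) (p : Int × List String) =>
      (PySem.List.enumerate p.2 0).foldl (fun count q =>
        if q.2 == "K" && decide (0 ≤ p.1 ∧ p.1 < size) && decide (0 ≤ q.1 ∧ q.1 < size) &&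
            ((|p.1 - r|, |q.1 - c|) == ((1 : Int), (2 : Int)) ||
             (|p.1 - r|, |q.1 - c|) == ((2 : Int), (1 : Int))) then
          count + 1
        else count) count) =
      (fun (count : Int) (p : Int × List String) =>
        count + ((PySem.List.enumerate p.2 0).countP (fun q =>
          baseP size p.1 q.1 q.2 && decide ((p.1 - r, q.1 - c) ∈ knightOffsets)) : Int)) := by
    funext count p
    rw [PySem.List.foldl_if_add_one]
    congr 2
    apply List.countP_congr
    intro q _
    simp only [baseP]
    rw [rel_mem]
  rw [hinner, PySem.List.foldl_add]
  push_cast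
  simp [List.map_map, Function.comp_def]

-- ===== VERDICT (by name: the statement is the Claim_ definition above) =====
theorem get_attacked_count_spec : Claim_equal_get_attacked_count := by
  intro matrix r c size _hdom hpre
  unfold Spec_get_attacked_count
  rw [A_eq_countP, B_eq_sum, mainCount matrix r c size knightOffsets (by decide) hpre]
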